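-- pv_equiv track=rewrite | github.com/Litusuwu/CODEFORCES---ICPC | ostritas.py | count_distinct_strings
-- ===== SOURCE A (Python) =====
-- def count_distinct_strings(t, test_cases):
--     results = []
--
--     for i in range(t):
--         n = test_cases[i][0]
--         s = test_cases[i][1]
--
--         # Count occurrences of each character
--         char_counts = {}
--         for char in s:
--             char_counts[char] = char_counts.get(char, 0) + 1
--
--         # Calculate the number of distinct non-empty strings
--         total_strings = 1
--         for count in char_counts.values():
--             total_strings *= (count + 1)
--
--         results.append(total_strings - 1)  # Subtract 1 for the empty string
--
--     return results
-- ===== SOURCE B (Python) =====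
-- def count_distinct_strings(t, test_cases):
--     # Sort each string and scan maximal runs of equal characters, multiplying
--     # a running product by (run length + 1); no dict is built.
--     results = []
--     for _, s in test_cases[:max(t, 0)]:
--         prod = 1
--         run = 0
--         prev = None
--         for ch in sorted(s):
--             if ch == prev:
--                 run += 1
--             else:
--                 prod *= run + 1
--                 prev = ch
--                 run = 1
--         results.append(prod * (run + 1) - 1)
--     return results
-- ===== Notes on version B (the rewrite author's own statement) =====
-- stated objective: alternative
-- what changed: Replaces the per-string dict of character frequencies with a sort-then-run-length scan: each string is sorted and a single pass multiplies the product by (run length + 1) for every maximal run of equal characters.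
import Mathlib
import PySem

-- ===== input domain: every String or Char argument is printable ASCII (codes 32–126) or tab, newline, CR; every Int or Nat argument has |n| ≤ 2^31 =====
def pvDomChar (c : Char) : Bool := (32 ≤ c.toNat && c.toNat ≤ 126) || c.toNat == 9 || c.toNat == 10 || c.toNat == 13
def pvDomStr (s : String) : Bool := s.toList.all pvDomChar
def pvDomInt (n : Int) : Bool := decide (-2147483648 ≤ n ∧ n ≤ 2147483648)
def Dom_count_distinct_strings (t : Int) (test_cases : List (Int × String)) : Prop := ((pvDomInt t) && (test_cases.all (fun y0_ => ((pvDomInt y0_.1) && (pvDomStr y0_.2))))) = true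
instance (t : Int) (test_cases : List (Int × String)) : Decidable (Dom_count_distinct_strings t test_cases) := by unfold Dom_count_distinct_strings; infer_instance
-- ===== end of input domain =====

-- B replaces A's per-string dict of character frequencies with a sort-then-run-length scan
-- (same results; a genuinely different traversal/data representation, no speed claim).

-- ===== PORT A =====
def count_distinct_strings (t : Int) (test_cases : List (Int × String)) : List Int :=
  (PySem.List.pyRange 0 t 1).foldl (fun results i =>
    -- n = test_cases[i][0] is read but unused; s = test_cases[i][1]
    -- (pyGetD: under Pre_ every i is in range, so the default is never read)
    let s := (PySem.List.pyGetD test_cases i (0, "")).2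
    let char_counts := s.toList.foldl
      (fun d ch => d.insert ch (d.getD ch 0 + 1)) (PySem.Dict.empty : PySem.Dict Char Int)
    let total_strings := char_counts.values.foldl (fun acc count => acc * (count + 1)) (1 : Int)
    results ++ [total_strings - 1]) []

-- ===== PORT B =====
-- one step of B's run-length scan over the sorted characters: state = (prod, run, prev)
def pvBStep (st : Int × Int × Option Char) (ch : Char) : Int × Int × Option Char :=
  if some ch = st.2.2 then (st.1, st.2.1 + 1, st.2.2)
  else (st.1 * (st.2.1 + 1), 1, some ch)

def pvBOne (s : String) : Int :=
  let st := (PySem.List.sorted s.toList (fun c => c) false).foldl pvBStep (1, 0, none)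
  st.1 * (st.2.1 + 1) - 1

def count_distinct_strings_alt (t : Int) (test_cases : List (Int × String)) : List Int :=
  -- test_cases[:max(t,0)] = take (max t 0) since max t 0 is nonnegative
  (test_cases.take (max t 0).toNat).foldl (fun results p => results ++ [pvBOne p.2]) []

-- ===== PRECONDITION & SPEC =====
-- A indexes test_cases[i] for i in range(t) and raises IndexError when t > len(test_cases).
def Pre_count_distinct_strings (t : Int) (test_cases : List (Int × String)) : Prop :=
  t ≤ (test_cases.length : Int)
instance (t : Int) (test_cases : List (Int × String)) : Decidable (Pre_count_distinct_strings t test_cases) := by unfold Pre_count_distinct_strings; infer_instance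
def pvWitness_count_distinct_strings : Int × (List (Int × String)) := (2, [(3, "aab"), (1, "")])

def Spec_count_distinct_strings (t : Int) (test_cases : List (Int × String)) (out : List Int) : Prop := out = count_distinct_strings_alt t test_cases
instance (t : Int) (test_cases : List (Int × String)) (out : List Int) : Decidable (Spec_count_distinct_strings t test_cases out) := by unfold Spec_count_distinct_strings; infer_instance

-- ===== CLAIM (what is proved, stated in full; the proofs are below) =====
def Claim_equal_count_distinct_strings : Prop := ∀ (t : Int) (test_cases : List (Int × String)), Dom_count_distinct_strings t test_cases → Pre_count_distinct_strings t test_cases → Spec_count_distinct_strings t test_cases (count_distinct_strings t test_cases)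

-- ===== LEMMAS AND PROOFS =====

-- proof helpers (below the claim block)
def pvProdDistinct (l : List Char) : Int :=
  ((PySem.Set.ofList l).map (fun c => (l.count c : Int) + 1)).prod

theorem foldl_mul_succ (l : List Int) (init : Int) :
    l.foldl (fun a v => a * (v + 1)) init = init * (l.map (· + 1)).prod := by
  induction l generalizing init with
  | nil => simp
  | cons x xs ih => simp [ih, mul_assoc]

theorem run_steps (k : List Char) (c : Char) (hk : ∀ x ∈ k, x = c) (p r : Int) :
    k.foldl pvBStep (p, r, some c) = (p, r + k.length, some c) := by
  induction k generalizing r with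
  | nil => simp
  | cons x xs ih =>
    have hx : x = c := hk x (by simp)
    subst hx
    simp only [List.foldl_cons, pvBStep, ite_true]
    rw [ih (fun y hy => hk y (by simp [hy]))]
    simp only [List.length_cons]
    refine Prod.ext rfl (Prod.ext ?_ rfl)
    push_cast; ring

theorem not_mem_dropWhile (d : Char) (l : List Char) (h : l.Pairwise (· ≤ ·))
    (hall : ∀ x ∈ l, d ≤ x) : d ∉ l.dropWhile (fun x => x == d) := by
  induction l with
  | nil => simp
  | cons x xs ih =>
    by_cases hx : x = d
    · subst hx
      simp only [List.dropWhile_cons, beq_self_eq_true, if_pos]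
      exact ih h.tail (fun y hy => hall y (by simp [hy]))
    · have : (x == d) = false := by simp [hx]
      simp only [List.dropWhile_cons, this]
      intro hd
      have hdx : d < x := lt_of_le_of_ne (hall x (by simp)) (fun e => hx e.symm)
      rcases List.mem_cons.mp hd with rfl | hd
      · exact absurd rfl (ne_of_gt hdx)
      · exact absurd ((List.pairwise_cons.mp h).1 d hd) (not_le.mpr hdx)

-- count facts and the perm decomposition
theorem prodDistinct_decomp (d : Char) (k rest' : List Char)
    (hk : ∀ x ∈ k, x = d) (hd : d ∉ rest') :
    pvProdDistinct (d :: (k ++ rest')) =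
      ((k.length : Int) + 2) * pvProdDistinct rest' := by
  unfold pvProdDistinct
  have hmem : ∀ a, a ∈ PySem.Set.ofList (d :: (k ++ rest')) ↔ a ∈ d :: PySem.Set.ofList rest' := by
    intro a
    simp only [PySem.Set.mem_ofList, List.mem_cons, List.mem_append]
    constructor
    · rintro (rfl | h | h)
      · exact Or.inl rfl
      · exact Or.inl (hk a h)
      · exact Or.inr (by simpa [PySem.Set.mem_ofList] using h)
    · rintro (rfl | h)
      · exact Or.inl rfl
      · exact Or.inr (Or.inr (by simpa [PySem.Set.mem_ofList] using h))
  have hperm : (PySem.Set.ofList (d :: (k ++ rest'))).Perm (d :: PySem.Set.ofList rest') := by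
    refine (List.perm_ext_iff_of_nodup ?_ ?_).mpr hmem
    · exact PySem.Set.nodup_ofList _
    · exact List.Nodup.cons (by simpa [PySem.Set.mem_ofList] using hd) (PySem.Set.nodup_ofList _)
  have hcd : (d :: (k ++ rest')).count d = k.length + 1 := by
    rw [List.count_cons_self, List.count_append]
    have h1 : k.count d = k.length := List.count_eq_length.mpr (fun b hb => ((hk b hb) ▸ rfl))
    have h2 : rest'.count d = 0 := List.count_eq_zero.mpr hd
    omega
  have hce : ∀ e ∈ rest', (d :: (k ++ rest')).count e = rest'.count e := by
    intro e he
    have hed : e ≠ d := fun h => hd (h ▸ he)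
    have hke : k.count e = 0 := List.count_eq_zero.mpr (fun h => hed (hk e h))
    simp [List.count_append, hke, Ne.symm hed]
  rw [List.Perm.prod_eq (hperm.map _)]
  simp only [List.map_cons, List.prod_cons, hcd]
  have : (PySem.Set.ofList rest').map (fun c => ((d :: (k ++ rest')).count c : Int) + 1)
       = (PySem.Set.ofList rest').map (fun c => (rest'.count c : Int) + 1) := by
    apply List.map_congr_left
    intro e he
    rw [hce e (by simpa [PySem.Set.mem_ofList] using he)]
  rw [this]
  push_cast
  ring

theorem finish_lemma : ∀ (n : Nat) (rest : List Char), rest.length ≤ n →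
    rest.Pairwise (· ≤ ·) → ∀ (p r : Int) (prev : Option Char), (∀ x ∈ rest, some x ≠ prev) →
    (rest.foldl pvBStep (p, r, prev)).1 * ((rest.foldl pvBStep (p, r, prev)).2.1 + 1)
      = p * (r + 1) * pvProdDistinct rest := by
  intro n
  induction n with
  | zero =>
    intro rest hlen _ p r prev _
    have : rest = [] := List.eq_nil_of_length_eq_zero (Nat.le_zero.mp hlen)
    subst this
    simp [pvProdDistinct, PySem.Set.ofList]
  | succ n ih =>
    intro rest hlen hpw p r prev hprev
    match rest with
    | [] => simp [pvProdDistinct, PySem.Set.ofList]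
    | d :: tl =>
      have hstep : pvBStep (p, r, prev) d = (p * (r + 1), 1, some d) := by
        simp [pvBStep, hprev d (by simp)]
      have hsplit : tl = tl.takeWhile (fun x => x == d) ++ tl.dropWhile (fun x => x == d) :=
        (List.takeWhile_append_dropWhile).symm
      set k := tl.takeWhile (fun x => x == d) with hk
      set rest' := tl.dropWhile (fun x => x == d) with hrest'
      have hkall : ∀ x ∈ k, x = d := by
        intro x hx
        simpa using List.mem_takeWhile_imp hx
      have htl_pw : tl.Pairwise (· ≤ ·) := hpw.tail
      have htl_ge : ∀ x ∈ tl, d ≤ x := (List.pairwise_cons.mp hpw).1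
      have hdnot : d ∉ rest' := not_mem_dropWhile d tl htl_pw htl_ge
      have hr'_pw : rest'.Pairwise (· ≤ ·) := htl_pw.sublist (List.dropWhile_sublist _)
      have hr'_len : rest'.length ≤ n := by
        have h1 := List.Sublist.length_le (List.dropWhile_sublist (l := tl) (p := fun x => x == d))
        rw [← hrest'] at h1
        simp only [List.length_cons] at hlen
        omega
      have hr'_prev : ∀ x ∈ rest', some x ≠ some d := by
        intro x hx h
        exact hdnot (Option.some.inj h ▸ hx)
      calc ((d :: tl).foldl pvBStep (p, r, prev)).1 * (((d :: tl).foldl pvBStep (p, r, prev)).2.1 + 1)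
          = ((k ++ rest').foldl pvBStep (p * (r + 1), 1, some d)).1
              * (((k ++ rest').foldl pvBStep (p * (r + 1), 1, some d)).2.1 + 1) := by
            rw [List.foldl_cons, hstep, ← hsplit]
        _ = (rest'.foldl pvBStep (p * (r + 1), 1 + (k.length : Int), some d)).1
              * ((rest'.foldl pvBStep (p * (r + 1), 1 + (k.length : Int), some d)).2.1 + 1) := by
            rw [List.foldl_append, run_steps k d hkall]
        _ = (p * (r + 1)) * ((1 + (k.length : Int)) + 1) * pvProdDistinct rest' := by
            exact ih rest' hr'_len hr'_pw _ _ _ hr'_prev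
        _ = p * (r + 1) * pvProdDistinct (d :: tl) := by
            rw [hsplit, prodDistinct_decomp d k rest' hkall hdnot]
            ring

theorem pvBOne_eq (s : String) : pvBOne s = pvProdDistinct s.toList - 1 := by
  unfold pvBOne
  set ls := PySem.List.sorted s.toList (fun c => c) false with hls
  have hpw : ls.Pairwise (· ≤ ·) := PySem.List.sorted_pairwise s.toList (fun c => c) 
  have h := finish_lemma ls.length ls le_rfl hpw 1 0 none (by simp)
  simp only [] at h
  have hperm : ls.Perm s.toList := PySem.List.sorted_perm s.toList (fun c => c) false
  have hcount : ∀ c, ls.count c = s.toList.count c := fun c => hperm.count_eq c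
  have hpd : pvProdDistinct ls = pvProdDistinct s.toList := by
    unfold pvProdDistinct
    have hsp : (PySem.Set.ofList ls).Perm (PySem.Set.ofList s.toList) := by
      refine (List.perm_ext_iff_of_nodup (PySem.Set.nodup_ofList _) (PySem.Set.nodup_ofList _)).mpr ?_
      intro a
      simp only [PySem.Set.mem_ofList]
      exact hperm.mem_iff
    calc ((PySem.Set.ofList ls).map (fun c => (ls.count c : Int) + 1)).prod
        = ((PySem.Set.ofList ls).map (fun c => (s.toList.count c : Int) + 1)).prod := by
          congr 1; exact List.map_congr_left (fun e _ => by rw [hcount e])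
      _ = ((PySem.Set.ofList s.toList).map (fun c => (s.toList.count c : Int) + 1)).prod :=
          List.Perm.prod_eq (hsp.map _)
  show (List.foldl pvBStep (1, 0, none) ls).1 * ((List.foldl pvBStep (1, 0, none) ls).2.1 + 1) - 1 = _
  rw [h, hpd]; ring

theorem aOne_eq (s : String) :
    ((s.toList.foldl (fun d ch => d.insert ch (d.getD ch 0 + 1))
        (PySem.Dict.empty : PySem.Dict Char Int)).values).foldl
      (fun acc count => acc * (count + 1)) (1 : Int)
      = pvProdDistinct s.toList := by
  rw [PySem.Dict.foldl_insert_getD_add_one_eq_counter]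
  have hv : (PySem.Dict.counter s.toList : PySem.Dict Char Int).values
      = (PySem.Set.ofList s.toList).map (fun k => (s.toList.count k : Int)) := by
    show ((PySem.Dict.counter s.toList : PySem.Dict Char Int).items.map (·.2)) = _
    rw [PySem.Dict.items_counter]
    simp [List.map_map, Function.comp]
  rw [hv, foldl_mul_succ]
  unfold pvProdDistinct
  rw [List.map_map, one_mul]
  exact congrArg List.prod (List.map_congr_left (fun e _ => rfl))

theorem count_distinct_strings_spec : Claim_equal_count_distinct_strings := by
  intro t tcs _ hpre
  unfold Pre_count_distinct_strings at hpre
  unfold Spec_count_distinct_strings count_distinct_strings count_distinct_strings_alt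
  rw [PySem.List.foldl_append_singleton_eq_map, PySem.List.foldl_append_singleton_eq_map]
  rcases le_or_gt t 0 with ht | ht
  · rw [PySem.List.pyRange_one_eq_nil (by omega)]
    have h0 : (max t 0).toNat = 0 := by omega
    rw [h0]
    simp
  · apply List.ext_getElem
    · simp only [List.nil_append, List.length_map, PySem.List.length_pyRange_one, List.length_take]
      omega
    · intro k h1 h2
      simp only [List.nil_append, List.getElem_map, PySem.List.getElem_pyRange_one, List.getElem_take]
      have hk : k < tcs.length := by
        simp only [List.nil_append, List.length_map, List.length_take] at h2
        omega
      have hidx : PySem.List.pyGetD tcs (0 + (k : Int)) (0, "") = tcs[k] := by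
        rw [zero_add, PySem.List.pyGetD_natCast, List.getD_eq_getElem _ _ hk]
      simp only [hidx]
      rw [aOne_eq, pvBOne_eq]

-- ===== VERDICT (by name: the statement is the Claim_ definition above) =====
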